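-- pv_equiv track=rewrite | github.com/MrBrantCode/unitest_baseline | mut_generate/mist_train_taco/taco_18434/solution.py | max_gcd_sum
-- ===== SOURCE A (Python) =====
-- def gcd(x, y):
--     while x != 0 and y != 0:
--         z = y
--         y = x % y
--         x = z
--     return x + y
--
-- def compute_other_gcd(A, gcd1):
--     ret = 0
--     for x in A:
--         if x % gcd1 != 0:
--             ret = gcd(ret, x)
--     if ret == 0:
--         return A[-1]
--     return ret
--
-- def max_gcd_sum(A):
--     A.sort()
--     d = 1
--     answer = 0
--     while d * d <= A[0]:
--         if A[0] % d == 0: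
--             answer = max(answer, d + compute_other_gcd(A, d))
--             answer = max(answer, A[0] // d + compute_other_gcd(A, A[0] // d))
--         d += 1
--     return answer
-- ===== SOURCE B (Python) =====
-- def _gcd(a, b):
--     while b:
--         a, b = b, a % b
--     return a
--
--
-- def max_gcd_sum(A):
--     # Loop transposition: one element-major pass over A maintains a running gcd
--     # per divisor of min(A), instead of A's divisor-major rescans.
--     # (Sorts A in place, like A; the equivalence is about the return value.)
--     A.sort()
--     m = A[0]
--     divs = []
--     d = 1
--     while d * d <= m:
--         if m % d == 0:
--             divs.append(d)
--             divs.append(m // d)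
--         d += 1
--     gs = [0] * len(divs)
--     for x in A:
--         gs = [_gcd(g, x) if x % dd else g for dd, g in zip(divs, gs)]
--     best = 0
--     for dd, g in zip(divs, gs):
--         best = max(best, dd + (g if g else A[-1]))
--     return best
-- ===== Notes on version B (the rewrite author's own statement) =====
-- stated objective: alternative
-- what changed: B transposes the nested loops: instead of A's divisor-major scheme (for each divisor of min(A), a fresh conditional-gcd scan of A), B makes one element-major pass over A maintaining a vector of running gcds, one per divisor, then applies the all-divisible fallback (the largest element) and takes the max in a final pass; both sort A in place.
import Mathlib
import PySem

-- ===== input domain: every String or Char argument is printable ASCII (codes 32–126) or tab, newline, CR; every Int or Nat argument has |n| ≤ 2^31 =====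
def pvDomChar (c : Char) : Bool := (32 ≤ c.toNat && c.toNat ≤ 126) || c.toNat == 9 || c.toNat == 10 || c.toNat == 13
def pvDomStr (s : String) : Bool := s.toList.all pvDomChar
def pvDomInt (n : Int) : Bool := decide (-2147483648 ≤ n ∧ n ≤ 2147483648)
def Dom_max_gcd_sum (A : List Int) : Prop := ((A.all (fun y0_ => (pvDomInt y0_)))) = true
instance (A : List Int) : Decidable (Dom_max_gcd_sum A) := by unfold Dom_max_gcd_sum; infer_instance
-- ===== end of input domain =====

-- B transposes A's nested loops: one element-major pass over A maintains a running gcd per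
-- divisor of min(A), instead of A's divisor-major rescans; equivalence is about the return
-- value (both Pythons sort A in place).

-- termination helper for the gcd loops (Python's % strictly shrinks |divisor|)
theorem pv_mod_natAbs_lt (x y : Int) (hy : y ≠ 0) : (PySem.Int.mod x y).natAbs < y.natAbs := by
  rcases lt_or_gt_of_ne hy with h | h
  · have h2 := PySem.Int.mod_neg_bounds x h
    omega
  · have h2 := PySem.Int.mod_nonneg x h
    have h3 := PySem.Int.mod_lt x h
    omega

-- termination helper for the sqrt loops: d*d ≤ a0 → d ≤ a0
theorem pv_le_of_sq_le (d a0 : Int) (h : d * d ≤ a0) : d ≤ a0 := by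
  by_cases hd : d ≤ 0
  · exact le_trans hd (le_trans (mul_nonneg (a := -d) (b := -d) (by omega) (by omega) |>.trans_eq (by ring)) h)
  · replace hd : 1 ≤ d := by omega
    calc d = 1 * d := (one_mul d).symm
      _ ≤ d * d := by exact mul_le_mul_of_nonneg_right hd (by omega)
      _ ≤ a0 := h

-- ===== PORT A =====
def pyGcdA (x y : Int) : Int :=
  if x ≠ 0 ∧ y ≠ 0 then pyGcdA y (PySem.Int.mod x y) else x + y
termination_by y.natAbs
decreasing_by exact pv_mod_natAbs_lt x y (by tauto)

def cogA (A : List Int) (g1 : Int) : Int :=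
  let ret := A.foldl (fun r x => if PySem.Int.mod x g1 ≠ 0 then pyGcdA r x else r) 0
  if ret = 0 then PySem.List.pyGetD A (-1) 0 else ret

def loopA (As : List Int) (a0 d answer : Int) : Int :=
  if d * d ≤ a0 then
    loopA As a0 (d + 1)
      (if PySem.Int.mod a0 d = 0 then
        max (max answer (d + cogA As d))
            (PySem.Int.floordiv a0 d + cogA As (PySem.Int.floordiv a0 d))
       else answer)
  else answer
termination_by (a0 + 1 - d).toNat
decreasing_by have := pv_le_of_sq_le d a0 (by assumption); omega

def max_gcd_sum (A : List Int) : Int :=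
  let As := PySem.List.sorted A (fun x => x) false
  loopA As (PySem.List.pyGetD As 0 0) 1 0

-- ===== PORT B =====
def altGcd (a b : Int) : Int :=
  if b = 0 then a else altGcd b (PySem.Int.mod a b)
termination_by b.natAbs
decreasing_by exact pv_mod_natAbs_lt a b (by assumption)

-- B's divisor-collecting while loop (appends d and m//d in increasing d)
def altDivs (m d : Int) : List Int :=
  if d * d ≤ m then
    (if PySem.Int.mod m d = 0 then [d, PySem.Int.floordiv m d] else []) ++ altDivs m (d + 1)
  else []
termination_by (m + 1 - d).toNat
decreasing_by have := pv_le_of_sq_le d m (by assumption); omega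

def max_gcd_sum_alt (A : List Int) : Int :=
  let As := PySem.List.sorted A (fun x => x) false
  let m := PySem.List.pyGetD As 0 0
  let divs := altDivs m 1
  -- the element-major pass: one running gcd per divisor, updated in lock-step over zip(divs, gs)
  let gs := As.foldl
    (fun gs x => (divs.zip gs).map (fun p => if PySem.Int.mod x p.1 ≠ 0 then altGcd p.2 x else p.2))
    (divs.map (fun _ => (0 : Int)))
  (divs.zip gs).foldl
    (fun b p => max b (p.1 + (if p.2 ≠ 0 then p.2 else PySem.List.pyGetD As (-1) 0))) 0

-- ===== PRECONDITION & SPEC =====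
-- Pre_ excludes only the empty list, on which both Pythons raise IndexError at the first element access.
def Pre_max_gcd_sum (A : List Int) : Prop := A ≠ []
instance (A : List Int) : Decidable (Pre_max_gcd_sum A) := by unfold Pre_max_gcd_sum; infer_instance
def pvWitness_max_gcd_sum : List Int := [6, 4]

def Spec_max_gcd_sum (A : List Int) (out : Int) : Prop := out = max_gcd_sum_alt A
instance (A : List Int) (out : Int) : Decidable (Spec_max_gcd_sum A out) := by unfold Spec_max_gcd_sum; infer_instance

-- ===== CLAIM (what is proved, stated in full; the proofs are below) =====
def Claim_equal_max_gcd_sum : Prop := ∀ (A : List Int), Dom_max_gcd_sum A → Pre_max_gcd_sum A → Spec_max_gcd_sum A (max_gcd_sum A)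

-- ===== LEMMAS AND PROOFS =====

-- the two gcd helpers agree
theorem gcd_eq_aux : ∀ (n : Nat) (x y : Int), y.natAbs = n → pyGcdA x y = altGcd x y := by
  intro n
  induction n using Nat.strong_induction_on with
  | _ n ih =>
    intro x y hn
    rw [pyGcdA]
    by_cases hy : y = 0
    · subst hy; rw [altGcd]; simp
    · by_cases hx : x = 0
      · subst hx
        rw [altGcd, if_neg hy]
        have h0 : PySem.Int.mod 0 y = 0 := by simp [PySem.Int.mod]
        rw [h0, altGcd]
        simp
      · rw [if_pos ⟨hx, hy⟩, altGcd, if_neg hy]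
        exact ih (PySem.Int.mod x y).natAbs (hn ▸ pv_mod_natAbs_lt x y hy) y (PySem.Int.mod x y) rfl

theorem gcd_eq (x y : Int) : pyGcdA x y = altGcd x y := gcd_eq_aux y.natAbs x y rfl

-- A's while loop folds the max update over the divisor list B collects
theorem loopA_eq_foldl : ∀ (n : Nat) (As : List Int) (a0 d ans : Int), (a0 + 1 - d).toNat = n →
    loopA As a0 d ans = (altDivs a0 d).foldl (fun b x => max b (x + cogA As x)) ans := by
  intro n
  induction n using Nat.strong_induction_on with
  | _ n ih =>
    intro As a0 d ans hn
    rw [loopA, altDivs]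
    by_cases hd : d * d ≤ a0
    · rw [if_pos hd, if_pos hd]
      have hlt : (a0 + 1 - (d + 1)).toNat < n := by
        have := pv_le_of_sq_le d a0 hd; omega
      by_cases hm : PySem.Int.mod a0 d = 0
      · rw [if_pos hm, if_pos hm]
        simp only [List.cons_append, List.nil_append, List.foldl_cons]
        exact ih _ hlt As a0 (d + 1) _ rfl
      · rw [if_neg hm, if_neg hm]
        simp only [List.nil_append]
        exact ih _ hlt As a0 (d + 1) ans rfl
    · rw [if_neg hd, if_neg hd]
      rfl

-- zipping divs with a snd-only update of (divs.zip gs) just threads the update through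
theorem zip_map_snd (f : Int → Int → Int) : ∀ (divs gs : List Int),
    divs.zip ((divs.zip gs).map (fun p => f p.1 p.2))
      = (divs.zip gs).map (fun p => (p.1, f p.1 p.2)) := by
  intro divs
  induction divs with
  | nil => intro gs; rfl
  | cons d t ih =>
    intro gs
    cases gs with
    | nil => rfl
    | cons g gt =>
      simp only [List.zip_cons_cons, List.map_cons]
      rw [ih gt]

-- the loop transposition: the element-major fold computes, per divisor, the divisor-major fold
theorem transpose (c : Int → Int → Prop) [∀ x d, Decidable (c x d)] :
    ∀ (As : List Int) (divs gs : List Int), gs.length = divs.length →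
    As.foldl (fun gs x => (divs.zip gs).map (fun p => if c x p.1 then altGcd p.2 x else p.2)) gs
      = (divs.zip gs).map (fun p => As.foldl (fun g x => if c x p.1 then altGcd g x else g) p.2) := by
  intro As
  induction As with
  | nil =>
    intro divs gs h
    simp only [List.foldl_nil]
    exact (List.map_snd_zip (l₁ := divs) (l₂ := gs) (by omega)).symm
  | cons x As ih =>
    intro divs gs h
    simp only [List.foldl_cons]
    rw [ih divs _ (by rw [List.length_map, List.length_zip]; omega)]
    rw [zip_map_snd (fun d g => if c x d then altGcd g x else g) divs gs]
    simp [List.map_map, Function.comp]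

-- zipping a list with a map of itself pairs each element with its image
theorem zip_self_map (l : List Int) (h : Int -> Int) :
    l.zip (l.map h) = l.map (fun d => (d, h d)) := by
  induction l with
  | nil => rfl
  | cons d t ih => simp only [List.map_cons, List.zip_cons_cons, ih]

-- B's per-divisor fold with the fallback equals A's compute_other_gcd
theorem cog_eq (As : List Int) (dd : Int) :
    dd + (if (As.foldl (fun g x => if PySem.Int.mod x dd ≠ 0 then altGcd g x else g) 0) ≠ 0
          then (As.foldl (fun g x => if PySem.Int.mod x dd ≠ 0 then altGcd g x else g) 0)
          else PySem.List.pyGetD As (-1) 0)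
      = dd + cogA As dd := by
  have hfun : (fun (g x : Int) => if PySem.Int.mod x dd ≠ 0 then altGcd g x else g)
      = (fun (r x : Int) => if PySem.Int.mod x dd ≠ 0 then pyGcdA r x else r) := by
    funext r x; rw [gcd_eq]
  rw [hfun]
  simp only [cogA, ite_not]

-- ===== VERDICT (by name: the statement is the Claim_ definition above) =====
theorem max_gcd_sum_spec : Claim_equal_max_gcd_sum := by
  intro A _ _
  unfold Spec_max_gcd_sum
  simp only [max_gcd_sum, max_gcd_sum_alt]
  set As := PySem.List.sorted A (fun x => x) false with hAs
  set m := PySem.List.pyGetD As 0 0 with hm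
  set divs := altDivs m 1 with hdivs
  rw [loopA_eq_foldl (m + 1 - 1).toNat As m 1 0 rfl]
  rw [transpose (fun x d => PySem.Int.mod x d ≠ 0) As divs (divs.map (fun _ => (0:Int)))
        (by rw [List.length_map])]
  rw [zip_self_map divs (fun _ => (0:Int)), List.map_map]
  simp only [Function.comp_def]
  rw [zip_self_map divs
    (fun d => As.foldl (fun g x => if PySem.Int.mod x d ≠ 0 then altGcd g x else g) 0)]
  rw [List.foldl_map]
  apply congrFun (congrFun (congrArg List.foldl ?_) 0) divs
  funext b d
  simp only []
  rw [cog_eq As d]
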